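-- pv_equiv track=rewrite | github.com/RescueDiver/arcs4 | reasoning/panel_pattern_rule_engine.py | best_consensus_unit
-- ===== SOURCE A (Python) =====
-- def count_row_differences(row_a, row_b):
--     if len(row_a) != len(row_b):
--         return 10**9
--     return sum(1 for a, b in zip(row_a, row_b) if a != b)
--
-- def build_repeating_row(unit, width):
--     out = []
--     for c in range(width):
--         out.append(unit[c % len(unit)])
--     return out
--
-- def best_repeating_unit_for_row(row):
--     """
--     Find the smallest repeating unit that reproduces the entire row.
--     """
--     w = len(row)
--
--     for unit_w in range(1, w + 1):
--         if w % unit_w != 0: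
--             continue
--
--         unit = row[:unit_w]
--         rebuilt = build_repeating_row(unit, w)
--
--         if rebuilt == row:
--             return unit
--
--     return None
--
-- def best_consensus_unit(rows):
--     """
--     Given several sibling rows of same width, choose a repeating unit
--     that best explains them collectively.
--
--     Returns:
--       unit, support_count, total_mismatches
--     """
--     if not rows:
--         return None, 0, 10**9
--
--     width = len(rows[0])
--     candidates = []
--
--     # collect exact repeating units from rows that already repeat cleanly
--     for row in rows:
--         unit = best_repeating_unit_for_row(row)
--         if unit is not None:
--             candidates.append(unit)
--
--     if not candidates:
--         return None, 0, 10**9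
--
--     best_unit = None
--     best_support = -1
--     best_total_mismatches = 10**9
--
--     unique_candidates = []
--     seen = set()
--     for unit in candidates:
--         key = tuple(unit)
--         if key not in seen:
--             seen.add(key)
--             unique_candidates.append(unit)
--
--     for unit in unique_candidates:
--         rebuilt = build_repeating_row(unit, width)
--
--         support = 0
--         total_mismatches = 0
--
--         for row in rows:
--             diffs = count_row_differences(row, rebuilt)
--             total_mismatches += diffs
--             if diffs == 0:
--                 support += 1
--
--         if (support > best_support) or (
--             support == best_support and total_mismatches < best_total_mismatches
--         ):
--             best_unit = unit
--             best_support = support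
--             best_total_mismatches = total_mismatches
--
--     return best_unit, best_support, best_total_mismatches
-- ===== SOURCE B (Python) =====
-- def best_consensus_unit(rows):
--     """
--     Same result as A, but the minimal repeating unit of each row is found via
--     the smallest prefix-suffix overlap (smallest period p with row[p:] == row[:-p]),
--     instead of trial division with full row rebuilding; candidate collection and
--     dedup are fused into one dict.fromkeys pass and the winner is picked with
--     max(key=(support, -mismatches)).
--     """
--     BIG = 10 ** 9
--     if not rows:
--         return None, 0, BIG
--
--     width = len(rows[0])
--
--     units = [list(u) for u in
--              dict.fromkeys(tuple(_minimal_unit(row)) for row in rows if row)]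
--     if not units:
--         return None, 0, BIG
--
--     scored = []
--     for u in units:
--         rebuilt = [u[i % len(u)] for i in range(width)]
--         diffs = [_row_diffs(row, rebuilt) for row in rows]
--         scored.append((u, sum(d == 0 for d in diffs), sum(diffs)))
--
--     u, s, m = max(scored, key=lambda t: (t[1], -t[2]))
--     return u, s, m
--
--
-- def _minimal_unit(row):
--     # smallest period p: row shifted by p agrees with itself (row[p:] == row[:-p]);
--     # the unit is row[:p] when p divides the width, else the row is its own unit.
--     w = len(row)
--     p = 1
--     while row[p:] != row[:w - p]:
--         p += 1
--     return row[:p] if w % p == 0 else row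
--
--
-- def _row_diffs(row, rebuilt):
--     if len(row) != len(rebuilt):
--         return 10 ** 9
--     return sum(a != b for a, b in zip(row, rebuilt))
-- ===== Notes on version B (the rewrite author's own statement) =====
-- stated objective: alternative
-- what changed: The per-row minimal repeating unit is found by scanning for the smallest prefix/suffix overlap period (row[p:] == row[:-p]) and checking it divides the width, instead of A's trial division over all divisor widths with full row rebuilding; candidate collection and ordered dedup are fused into one dict.fromkeys pass and the winner is chosen with max(key=(support, -mismatches)) instead of a hand-written strict-improvement loop.
import Mathlib
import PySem

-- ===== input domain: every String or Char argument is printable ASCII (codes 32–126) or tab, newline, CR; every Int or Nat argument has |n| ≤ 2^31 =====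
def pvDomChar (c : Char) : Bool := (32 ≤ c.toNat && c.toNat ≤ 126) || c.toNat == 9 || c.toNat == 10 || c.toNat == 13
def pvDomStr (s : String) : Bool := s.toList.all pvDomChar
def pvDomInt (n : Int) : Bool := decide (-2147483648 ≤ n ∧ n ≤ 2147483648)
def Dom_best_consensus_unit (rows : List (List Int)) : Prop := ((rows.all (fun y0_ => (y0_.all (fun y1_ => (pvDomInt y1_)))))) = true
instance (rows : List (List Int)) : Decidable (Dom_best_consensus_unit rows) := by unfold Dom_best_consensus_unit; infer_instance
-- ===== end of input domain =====

-- B replaces A's trial-division minimal-unit search by a smallest prefix/suffix-overlap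
-- period scan, fuses candidate collection with an ordered dedup, and picks the winner
-- with a first-maximum under the (support, -mismatches) key; same results (objective: alternative).

-- ===== PORT A =====
def count_row_differences (row_a row_b : List Int) : Int :=
  if row_a.length ≠ row_b.length then 10 ^ 9
  else (((row_a.zip row_b).filter (fun p => p.1 != p.2)).map (fun _ => (1 : Int))).sum

def build_repeating_row (unit : List Int) (width : Int) : List Int :=
  (PySem.List.pyRange 0 width 1).foldl
    (fun out c => out ++ [PySem.List.pyGetD unit (PySem.Int.mod c (unit.length : Int)) 0]) []

def brufLoop (row : List Int) (ds : List Int) : Option (List Int) :=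
  match ds with
  | [] => none
  | uw :: rest =>
    if PySem.Int.mod (row.length : Int) uw != 0 then brufLoop row rest
    else
      let unit := PySem.List.slice row none (some uw)
      let rebuilt := build_repeating_row unit (row.length : Int)
      if rebuilt == row then some unit else brufLoop row rest

def best_repeating_unit_for_row (row : List Int) : Option (List Int) :=
  brufLoop row (PySem.List.pyRange 1 ((row.length : Int) + 1) 1)

def best_consensus_unit (rows : List (List Int)) : Option (List Int) × Int × Int :=
  match rows with
  | [] => (none, 0, 10 ^ 9)
  | r0 :: _ =>
    let width : Int := (r0.length : Int)
    let candidates := rows.foldl (fun acc row =>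
        match best_repeating_unit_for_row row with
        | some unit => acc ++ [unit]
        | none => acc) []
    if candidates = [] then (none, 0, 10 ^ 9)
    else
      let su := candidates.foldl
          (fun (su : List (List Int) × List (List Int)) unit =>
            if PySem.Set.contains su.1 unit then su
            else (PySem.Set.add su.1 unit, su.2 ++ [unit])) ([], [])
      su.2.foldl (fun (best : Option (List Int) × Int × Int) unit =>
          let rebuilt := build_repeating_row unit width
          let st := rows.foldl (fun (st : Int × Int) row =>
              let diffs := count_row_differences row rebuilt
              ((if diffs == 0 then st.1 + 1 else st.1), st.2 + diffs)) (0, 0)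
          if (st.1 > best.2.1) || (st.1 == best.2.1 && st.2 < best.2.2)
          then (some unit, st.1, st.2) else best) (none, -1, 10 ^ 9)

-- ===== PORT B =====
-- row[p:] / row[:w-p] / row[:p] with 0 ≤ p ≤ w are drop/take, exact by
-- PySem.List.slice_from_natCast / slice_to_natCast; w % p is Nat mod, exact by PySem.Int.mod_natCast.
def minUnitLoop (row : List Int) (p : Nat) : Nat :=
  if row.drop p = row.take (row.length - p) then p
  else minUnitLoop row (p + 1)
termination_by row.length - p
decreasing_by
  rename_i h
  have hp : p < row.length := by
    by_contra hge
    push Not at hge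
    apply h
    rw [List.drop_eq_nil_of_le hge, Nat.sub_eq_zero_of_le hge, List.take_zero]
  omega

def minimal_unit (row : List Int) : List Int :=
  let w := row.length
  let p := minUnitLoop row 1
  if w % p == 0 then row.take p else row

def row_diffs (row rebuilt : List Int) : Int :=
  -- sum of booleans over the zip = count of mismatching positions
  if row.length ≠ rebuilt.length then 10 ^ 9
  else ((row.zip rebuilt).countP (fun p => p.1 != p.2) : Int)

def best_consensus_unit_alt (rows : List (List Int)) : Option (List Int) × Int × Int :=
  match rows with
  | [] => (none, 0, 10 ^ 9)
  | r0 :: _ =>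
    let width : Int := (r0.length : Int)
    let units := PySem.List.dedup ((rows.filter (fun r => r != [])).map minimal_unit)
    if units = [] then (none, 0, 10 ^ 9)
    else
      let scored := units.map (fun u =>
        let rebuilt := (PySem.List.pyRange 0 width 1).map
            (fun i => PySem.List.pyGetD u (PySem.Int.mod i (u.length : Int)) 0)
        let diffs := rows.map (fun row => row_diffs row rebuilt)
        (u, (diffs.countP (fun d => d == 0) : Int), diffs.sum))
      match PySem.List.max2? scored (fun t => t.2.1) (fun t => - t.2.2) with
      | some t => (some t.1, t.2.1, t.2.2)
      | none => (none, 0, 10 ^ 9)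

-- ===== PRECONDITION & SPEC =====
def Spec_best_consensus_unit (rows : List (List Int)) (out : Option (List Int) × Int × Int) : Prop := out = best_consensus_unit_alt rows
instance (rows : List (List Int)) (out : Option (List Int) × Int × Int) : Decidable (Spec_best_consensus_unit rows out) := by unfold Spec_best_consensus_unit; infer_instance

-- ===== CLAIM (what is proved, stated in full; the proofs are below) =====
def Claim_equal_best_consensus_unit : Prop := ∀ (rows : List (List Int)), Dom_best_consensus_unit rows → Spec_best_consensus_unit rows (best_consensus_unit rows)

-- ===== LEMMAS AND PROOFS =====

-- p is a period of the row: shifting by p preserves entries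
def IsPeriod (row : List Int) (p : Nat) : Prop :=
  ∀ i : Nat, i + p < row.length → row[i]? = row[i + p]?

-- B's loop test (suffix = prefix overlap) says exactly that p is a period
theorem overlap_iff_isPeriod (row : List Int) (p : Nat) :
    (row.drop p = row.take (row.length - p)) ↔ IsPeriod row p := by
  constructor
  · intro h i hi
    have := congrArg (fun l => l[i]?) h
    simp only [List.getElem?_drop, List.getElem?_take] at this
    rw [if_pos (by omega), Nat.add_comm] at this
    exact this.symm
  · intro h
    apply List.ext_getElem?
    intro i
    simp only [List.getElem?_drop, List.getElem?_take]
    by_cases hi : i < row.length - p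
    · rw [if_pos hi, Nat.add_comm]
      exact (h i (by omega)).symm
    · rw [if_neg hi]
      exact List.getElem?_eq_none (by omega)

theorem isPeriod_length (row : List Int) : IsPeriod row row.length := by
  intro i h
  omega

theorem isPeriod_sub (row : List Int) (p q : Nat) (hpq : p < q)
    (h1 : IsPeriod row p) (h2 : IsPeriod row q) (hle : p + q ≤ row.length) :
    IsPeriod row (q - p) := by
  intro i hi
  by_cases hc : i + q < row.length
  · have e1 := h2 i hc
    have e2 := h1 (i + (q - p)) (by omega)
    have : i + (q - p) + p = i + q := by omega
    rw [this] at e2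
    rw [e1, ← e2]
  · have e1 := h1 (i - p) (by omega)
    have h1' : i - p + p = i := by omega
    rw [h1'] at e1
    have e2 := h2 (i - p) (by omega)
    have h2' : i - p + q = i + (q - p) := by omega
    rw [h2'] at e2
    rw [← e1, e2]

theorem fine_wilf (row : List Int) (p q : Nat) (hp : 1 ≤ p) (hq : 1 ≤ q)
    (h1 : IsPeriod row p) (h2 : IsPeriod row q) (hle : p + q ≤ row.length) :
    IsPeriod row (Nat.gcd p q) := by
  by_cases hpq : p = q
  · subst hpq; simpa [Nat.gcd_self] using h1
  · rcases Nat.lt_or_ge p q with hlt | hge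
    · have := fine_wilf row p (q - p) hp (by omega) h1
        (isPeriod_sub row p q hlt h1 h2 hle) (by omega)
      rwa [Nat.gcd_sub_self_right (by omega)] at this
    · have hqp : q < p := by omega
      have := fine_wilf row (p - q) q (by omega) hq
        (isPeriod_sub row q p hqp h2 h1 (by omega)) h2 (by omega)
      rwa [Nat.gcd_sub_self_left (by omega)] at this
termination_by p + q

-- a period d ≤ w repeats the first d entries across the row
theorem isPeriod_iff_mod (row : List Int) (d : Nat) (hd : 1 ≤ d) :
    (IsPeriod row d ↔ ∀ i, i < row.length → row[i]? = row[i % d]?) := by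
  constructor
  · intro h i
    induction i using Nat.strong_induction_on with
    | _ i ih =>
      intro hi
      by_cases hid : i < d
      · rw [Nat.mod_eq_of_lt hid]
      · have e1 := h (i - d) (by omega)
        have hsub : i - d + d = i := by omega
        rw [hsub] at e1
        have e2 := ih (i - d) (by omega) (by omega)
        rw [← e1, e2]
        congr 1
        conv_lhs => rw [← Nat.add_mod_right (i - d) d, hsub]
  · intro h i hi
    rw [h i (by omega), h (i + d) (by omega), Nat.add_mod_right]

-- A's rebuilt row, normalised to a map over List.range
theorem build_repeating_row_eq (unit : List Int) (w : Nat) :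
    build_repeating_row unit (w : Int) =
      (List.range w).map (fun c => unit.getD (c % unit.length) 0) := by
  unfold build_repeating_row
  rw [PySem.List.pyRange_zero_natCast, List.foldl_map,
      PySem.List.foldl_append_singleton_eq_map (f := fun (k : Nat) =>
        PySem.List.pyGetD unit (PySem.Int.mod (k : Int) (unit.length : Int)) 0)]
  simp only [List.nil_append]
  apply List.map_congr_left
  intro a _
  rw [PySem.Int.mod_natCast, PySem.List.pyGetD_natCast]

-- B's rebuilt comprehension is the same map
theorem rebuilt_alt_eq (u : List Int) (w : Nat) :
    (PySem.List.pyRange 0 (w : Int) 1).map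
        (fun i => PySem.List.pyGetD u (PySem.Int.mod i (u.length : Int)) 0) =
      (List.range w).map (fun c => u.getD (c % u.length) 0) := by
  rw [PySem.List.pyRange_zero_natCast, List.map_map]
  apply List.map_congr_left
  intro a _
  simp only [Function.comp]
  rw [PySem.Int.mod_natCast, PySem.List.pyGetD_natCast]

theorem map_range_getD (row : List Int) (d i : Nat) (hd : 1 ≤ d) (hdw : d ≤ row.length)
    (hi : i < row.length) :
    ((List.range row.length).map
      (fun c => (row.take d).getD (c % (row.take d).length) 0))[i]? = row[i % d]? := by
  have hlen : (row.take d).length = d := by simp [Nat.min_eq_left hdw]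
  have hmod : i % d < d := Nat.mod_lt _ (by omega)
  rw [List.getElem?_map, List.getElem?_range hi]
  simp only [Option.map_some, hlen]
  rw [List.getD_eq_getElem?_getD, List.getElem?_take, if_pos hmod]
  rw [List.getElem?_eq_getElem (by omega)]
  simp

-- A's acceptance test for a candidate width d is exactly "d is a period"
theorem rebuild_eq_iff (row : List Int) (d : Nat) (hd : 1 ≤ d) (hdw : d ≤ row.length) :
    (build_repeating_row (row.take d) (row.length : Int) = row ↔ IsPeriod row d) := by
  rw [build_repeating_row_eq, isPeriod_iff_mod row d hd]
  constructor
  · intro h i hi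
    have := congrArg (fun l => l[i]?) h
    simp only at this
    rw [map_range_getD row d i hd hdw hi] at this
    exact this.symm
  · intro h
    apply List.ext_getElem?
    intro i
    by_cases hi : i < row.length
    · rw [map_range_getD row d i hd hdw hi]
      exact (h i hi).symm
    · rw [List.getElem?_eq_none (by simpa using hi), List.getElem?_eq_none (by omega)]

-- B's scan finds the first overlap point at or after p
theorem minUnitLoop_spec (row : List Int) (p : Nat) :
    p ≤ minUnitLoop row p ∧
    (row.drop (minUnitLoop row p) = row.take (row.length - minUnitLoop row p)) ∧
    (∀ q, p ≤ q → q < minUnitLoop row p →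
      ¬(row.drop q = row.take (row.length - q))) ∧
    minUnitLoop row p ≤ max p row.length := by
  fun_induction minUnitLoop row p with
  | case1 p h =>
    exact ⟨le_refl _, h, fun q h1 h2 => by omega, by omega⟩
  | case2 p h ih =>
    obtain ⟨ih1, ih2, ih3, ih4⟩ := ih
    have hp : p < row.length := by
      by_contra hge
      push Not at hge
      apply h
      rw [List.drop_eq_nil_of_le hge, Nat.sub_eq_zero_of_le hge, List.take_zero]
    refine ⟨by omega, ih2, ?_, by omega⟩
    intro q hq1 hq2
    rcases Nat.eq_or_lt_of_le hq1 with hq | hq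
    · subst hq; exact h
    · exact ih3 q (by omega) hq2

-- A's divisor scan, started at or below the least admissible divisor D, returns row[:D]
theorem brufLoop_eq (row : List Int) (D : Nat) (hD1 : 1 ≤ D) (hDw : D ≤ row.length)
    (hdvd : D ∣ row.length) (hper : IsPeriod row D)
    (hmin : ∀ d, 1 ≤ d → d < D → d ∣ row.length → ¬IsPeriod row d) :
    ∀ k, 1 ≤ k → k ≤ D →
      brufLoop row (PySem.List.pyRange (k : Int) ((row.length : Int) + 1) 1) =
        some (row.take D) := by
  intro k hk1 hkD
  induction hn : D - k generalizing k with
  | zero =>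
    have hkD' : k = D := by omega
    subst hkD'
    rw [PySem.List.pyRange_one_cons (by exact_mod_cast by omega)]
    unfold brufLoop
    have hmod : PySem.Int.mod (row.length : Int) (k : Int) = 0 := by
      rw [PySem.Int.mod_natCast]
      rcases hdvd with ⟨m, hm⟩
      simp [hm, Nat.mul_mod_right]
    rw [hmod]
    simp only [bne_self_eq_false, Bool.false_eq_true, if_false]
    have hslice : PySem.List.slice row none (some (k : Int)) = row.take k :=
      PySem.List.slice_to_natCast row k
    rw [hslice]
    have : build_repeating_row (row.take k) ((row.length : Int)) = row :=
      (rebuild_eq_iff row k hk1 hDw).2 hper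
    simp [this]
  | succ n ihn =>
    have hkD' : k < D := by omega
    rw [PySem.List.pyRange_one_cons (by exact_mod_cast by omega)]
    unfold brufLoop
    by_cases hdk : k ∣ row.length
    · have hmod : PySem.Int.mod (row.length : Int) (k : Int) = 0 := by
        rw [PySem.Int.mod_natCast]
        rcases hdk with ⟨m, hm⟩
        simp [hm, Nat.mul_mod_right]
      rw [hmod]
      simp only [bne_self_eq_false, Bool.false_eq_true, if_false]
      rw [PySem.List.slice_to_natCast row k]
      have hnoper : ¬IsPeriod row k := hmin k hk1 hkD' hdk
      have : build_repeating_row (row.take k) ((row.length : Int)) ≠ row := by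
        intro hc
        exact hnoper ((rebuild_eq_iff row k hk1 (by omega)).1 hc)
      have hbeq : (build_repeating_row (row.take k) ((row.length : Int)) == row) = false := by
        simpa using this
      rw [hbeq]
      simp only [Bool.false_eq_true, if_false]
      have : ((k : Int) + 1) = ((k + 1 : Nat) : Int) := by push_cast; ring
      rw [this]
      exact ihn (k + 1) (by omega) (by omega) (by omega)
    · have hmod : PySem.Int.mod (row.length : Int) (k : Int) ≠ 0 := by
        rw [PySem.Int.mod_natCast]
        intro hc
        exact hdk (Nat.dvd_of_mod_eq_zero (by exact_mod_cast hc))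
      have hbne : (PySem.Int.mod (row.length : Int) (k : Int) != 0) = true := by
        simpa using hmod
      rw [hbne]
      simp only [if_true]
      have : ((k : Int) + 1) = ((k + 1 : Nat) : Int) := by push_cast; ring
      rw [this]
      exact ihn (k + 1) (by omega) (by omega) (by omega)

-- the two minimal-unit finders agree on every nonempty row
theorem bruf_eq_minimal_unit (row : List Int) (hrow : row ≠ []) :
    best_repeating_unit_for_row row = some (minimal_unit row) := by
  have hw : 1 ≤ row.length := by
    cases row with
    | nil => exact absurd rfl hrow
    | cons a l => simp
  obtain ⟨hp1, hov, hminq, hple⟩ := minUnitLoop_spec row 1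
  set p0 := minUnitLoop row 1 with hp0
  have hper0 : IsPeriod row p0 := (overlap_iff_isPeriod row p0).1 hov
  have hp0w : p0 ≤ row.length := by omega
  have hmin0 : ∀ q, 1 ≤ q → q < p0 → ¬IsPeriod row q := by
    intro q h1 h2 hper
    exact hminq q h1 h2 ((overlap_iff_isPeriod row q).2 hper)
  by_cases hdvd : row.length % p0 = 0
  · -- the least period divides the width: A finds it as the least dividing period
    have hdv : p0 ∣ row.length := Nat.dvd_of_mod_eq_zero hdvd
    have := brufLoop_eq row p0 hp1 hp0w hdv hper0
      (fun d h1 h2 _ => hmin0 d h1 h2) 1 (le_refl _) hp1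
    rw [Nat.cast_one] at this
    unfold best_repeating_unit_for_row
    rw [this]
    unfold minimal_unit
    simp only [← hp0, hdvd, beq_self_eq_true, if_true]
  · -- the least period does not divide: no proper divisor is a period (Fine–Wilf)
    have hminw : ∀ d, 1 ≤ d → d < row.length → d ∣ row.length → ¬IsPeriod row d := by
      intro d h1 h2 hdv hper
      have hp0d : p0 ≤ d := by
        by_contra hlt
        exact hmin0 d h1 (by omega) hper
      have h2d : 2 * d ≤ row.length := by
        rcases hdv with ⟨m, hm⟩
        have hm2 : 2 ≤ m := by
          rcases Nat.lt_or_ge m 2 with hm1 | hm1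
          · interval_cases m <;> omega
          · exact hm1
        calc 2 * d = d * 2 := by ring
          _ ≤ d * m := Nat.mul_le_mul_left d hm2
          _ = row.length := hm.symm
      have hgcd := fine_wilf row p0 d hp1 h1 hper0 hper (by omega)
      have hg1 : 1 ≤ Nat.gcd p0 d := Nat.gcd_pos_of_pos_left d (by omega)
      have hgle : Nat.gcd p0 d ≤ p0 := Nat.le_of_dvd (by omega) (Nat.gcd_dvd_left p0 d)
      have hge : Nat.gcd p0 d = p0 := by
        by_contra hne
        exact hmin0 (Nat.gcd p0 d) hg1 (by omega) hgcd
      have : p0 ∣ row.length := (hge ▸ Nat.gcd_dvd_right p0 d).trans hdv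
      exact hdvd (Nat.dvd_iff_mod_eq_zero.mp this)
    have := brufLoop_eq row row.length hw (le_refl _) dvd_rfl (isPeriod_length row)
      hminw 1 (le_refl _) hw
    rw [Nat.cast_one] at this
    unfold best_repeating_unit_for_row
    rw [this]
    unfold minimal_unit
    simp only [← hp0]
    have hbeq : (row.length % p0 == 0) = false := by simpa using hdvd
    rw [hbeq]
    simp [List.take_length]

theorem bruf_nil : best_repeating_unit_for_row [] = none := by
  decide

-- A's candidate loop is the mapped filter B uses
theorem candidates_eq (rows : List (List Int)) (acc : List (List Int)) :
    rows.foldl (fun acc row =>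
        match best_repeating_unit_for_row row with
        | some unit => acc ++ [unit]
        | none => acc) acc =
      acc ++ (rows.filter (fun r => r != [])).map minimal_unit := by
  induction rows generalizing acc with
  | nil => simp
  | cons r rs ih =>
    by_cases h : r = []
    · subst h; simpa [bruf_nil] using ih acc
    · simp only [List.foldl_cons, bruf_eq_minimal_unit r h, List.filter_cons]
      have hb : (r != []) = true := by simpa using h
      rw [ih]
      simp [hb]

-- A's seen/unique loop stays on the diagonal and computes the ordered dedup
theorem seen_unique_eq (cs : List (List Int)) (s : List (List Int)) :
    cs.foldl (fun (su : List (List Int) × List (List Int)) unit =>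
        if PySem.Set.contains su.1 unit then su
        else (PySem.Set.add su.1 unit, su.2 ++ [unit])) (s, s) =
      (cs.foldl PySem.Set.add s, cs.foldl PySem.Set.add s) := by
  induction cs generalizing s with
  | nil => rfl
  | cons c cs ih =>
    simp only [List.foldl_cons]
    have hadd : PySem.Set.add s c = if PySem.Set.contains s c then s else s ++ [c] := rfl
    by_cases h : PySem.Set.contains s c
    · rw [if_pos h, hadd, if_pos h, ih]
    · rw [if_neg (by simpa using h), hadd, if_neg h, ih]

theorem dedup_ne_nil (cs : List (List Int)) (h : cs ≠ []) : PySem.List.dedup cs ≠ [] := by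
  match cs with
  | c :: cs' =>
    intro hnil
    have : c ∈ PySem.List.dedup (c :: cs') := (PySem.List.mem_dedup _ _).2 (by simp)
    rw [hnil] at this
    simp at this

-- the two mismatch counters agree
theorem count_eq_row_diffs (a b : List Int) : count_row_differences a b = row_diffs a b := by
  unfold count_row_differences row_diffs
  split_ifs with h
  · rfl
  · rw [List.map_const', List.sum_replicate, ← List.countP_eq_length_filter]
    simp

-- A's inner scoring loop equals B's (countP, sum) of the diff list
theorem score_eq (rows : List (List Int)) (rebuilt : List Int) :
    rows.foldl (fun (st : Int × Int) row =>
        ((if count_row_differences row rebuilt == 0 then st.1 + 1 else st.1),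
          st.2 + count_row_differences row rebuilt)) (0, 0) =
      (((rows.map (fun row => row_diffs row rebuilt)).countP (fun d => d == 0) : Int),
        (rows.map (fun row => row_diffs row rebuilt)).sum) := by
  rw [PySem.List.foldl_prod_mk
      (f := fun a row => if count_row_differences row rebuilt == 0 then a + 1 else a)
      (g := fun b row => b + count_row_differences row rebuilt)]
  rw [PySem.List.foldl_if_add_one (p := fun row => count_row_differences row rebuilt == 0)]
  rw [PySem.List.foldl_add (g := fun row => count_row_differences row rebuilt)]
  rw [List.countP_map]
  have hcr : ∀ row, count_row_differences row rebuilt = row_diffs row rebuilt :=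
    fun row => count_eq_row_diffs row rebuilt
  simp only [Prod.mk.injEq, zero_add]
  constructor
  · congr 1
    apply List.countP_congr
    intro row _
    simp [Function.comp, hcr row]
  · congr 1
    apply List.map_congr_left
    intro row _
    exact hcr row

-- the selection update A performs per scored unit
def selUpd (best : Option (List Int) × Int × Int) (x : List Int × Int × Int) :
    Option (List Int) × Int × Int :=
  if (x.2.1 > best.2.1) || (x.2.1 == best.2.1 && x.2.2 < best.2.2)
  then (some x.1, x.2.1, x.2.2) else best

-- A's strict-improvement fold is PySem's first-maximum once both hold a packed state
theorem sel_diag (t : List (List Int × Int × Int)) (m : List Int × Int × Int) :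
    ∃ r, PySem.List.max2? (m :: t) (fun t => t.2.1) (fun t => - t.2.2) = some r ∧
      t.foldl selUpd (some m.1, m.2.1, m.2.2) = (some r.1, r.2.1, r.2.2) := by
  unfold PySem.List.max2?
  simp only [List.foldl_cons]
  induction t generalizing m with
  | nil => exact ⟨m, rfl, rfl⟩
  | cons c t ih =>
    simp only [List.foldl_cons, selUpd]
    have hcond : (decide (m.2.1 < c.2.1) || !decide (c.2.1 < m.2.1) && decide (- m.2.2 < - c.2.2))
        = ((c.2.1 > m.2.1) || (c.2.1 == m.2.1 && c.2.2 < m.2.2)) := by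
      by_cases h1 : m.2.1 < c.2.1
      · simp [h1, gt_iff_lt]
      · by_cases h2 : c.2.1 < m.2.1
        · have : (c.2.1 == m.2.1) = false := by simp; omega
          simp [h1, h2, this, gt_iff_lt]
        · have he : (c.2.1 == m.2.1) = true := by simp; omega
          have hlt : (- m.2.2 < - c.2.2) ↔ (c.2.2 < m.2.2) := by omega
          simp [h1, h2, he, gt_iff_lt, hlt]
    by_cases hc : ((c.2.1 > m.2.1) || (c.2.1 == m.2.1 && c.2.2 < m.2.2)) = true
    · rw [hc] at hcond
      rw [hcond, if_pos rfl, if_pos hc]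
      exact ih c
    · have hc' := Bool.eq_false_iff.2 hc
      rw [Bool.not_eq_true] at hc
      rw [hc] at hcond
      rw [hcond]
      simp only [Bool.false_eq_true, if_false, hc]
      exact ih m

-- the normalised rebuilt row both sides compute for a unit at a given width
def rebuiltR (u : List Int) (w : Nat) : List Int :=
  (List.range w).map (fun c => u.getD (c % u.length) 0)

-- the score triple both sides attach to a unit
def scoreR (rows : List (List Int)) (w : Nat) (u : List Int) : List Int × Int × Int :=
  (u, ((rows.map (fun row => row_diffs row (rebuiltR u w))).countP (fun d => d == 0) : Int),
    (rows.map (fun row => row_diffs row (rebuiltR u w))).sum)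

-- the whole scoring-and-selection stage: A's fold over the unique units equals
-- B's first-maximum over the scored list
theorem sel_stage (rows' : List (List Int)) (w : Nat) (us : List (List Int)) (husne : us ≠ []) :
    us.foldl (fun (best : Option (List Int) × Int × Int) unit =>
        let rebuilt := build_repeating_row unit ((w : Nat) : Int)
        let st := rows'.foldl (fun (st : Int × Int) row =>
            ((if count_row_differences row rebuilt == 0 then st.1 + 1 else st.1),
              st.2 + count_row_differences row rebuilt)) (0, 0)
        if (st.1 > best.2.1) || (st.1 == best.2.1 && st.2 < best.2.2)
        then (some unit, st.1, st.2) else best) (none, -1, 10 ^ 9) =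
      (match PySem.List.max2? (us.map (fun u =>
            let rebuilt := (PySem.List.pyRange 0 ((w : Nat) : Int) 1).map
                (fun i => PySem.List.pyGetD u (PySem.Int.mod i (u.length : Int)) 0)
            let diffs := rows'.map (fun row => row_diffs row rebuilt)
            (u, (diffs.countP (fun d => d == 0) : Int), diffs.sum)))
          (fun t => t.2.1) (fun t => - t.2.2) with
        | some t => (some t.1, t.2.1, t.2.2)
        | none => (none, 0, 10 ^ 9)) := by
  have hbody : ∀ (best : Option (List Int) × Int × Int) (unit : List Int),
      (let rebuilt := build_repeating_row unit ((w : Nat) : Int)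
       let st := rows'.foldl (fun (st : Int × Int) row =>
          ((if count_row_differences row rebuilt == 0 then st.1 + 1 else st.1),
            st.2 + count_row_differences row rebuilt)) (0, 0)
       if (st.1 > best.2.1) || (st.1 == best.2.1 && st.2 < best.2.2)
       then (some unit, st.1, st.2) else best) = selUpd best (scoreR rows' w unit) := by
    intro best unit
    have hreb : build_repeating_row unit ((w : Nat) : Int) = rebuiltR unit w :=
      build_repeating_row_eq unit w
    simp only [hreb, score_eq rows' (rebuiltR unit w)]
    rfl
  refine Eq.trans (PySem.List.foldl_congr_mem
      (f := fun (best : Option (List Int) × Int × Int) unit =>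
        let rebuilt := build_repeating_row unit ((w : Nat) : Int)
        let st := rows'.foldl (fun (st : Int × Int) row =>
            ((if count_row_differences row rebuilt == 0 then st.1 + 1 else st.1),
              st.2 + count_row_differences row rebuilt)) (0, 0)
        if (st.1 > best.2.1) || (st.1 == best.2.1 && st.2 < best.2.2)
        then (some unit, st.1, st.2) else best)
      (g := fun best unit => selUpd best (scoreR rows' w unit))
      (init := (none, -1, 10 ^ 9)) (l := us)
      (fun best unit _ => hbody best unit)) ?_
  refine Eq.trans ((List.foldl_map (f := scoreR rows' w) (g := selUpd) (l := us)
      (init := ((none, -1, 10 ^ 9) : Option (List Int) × Int × Int))).symm) ?_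
  have hscored : (us.map (fun u =>
      let rebuilt := (PySem.List.pyRange 0 ((w : Nat) : Int) 1).map
          (fun i => PySem.List.pyGetD u (PySem.Int.mod i (u.length : Int)) 0)
      let diffs := rows'.map (fun row => row_diffs row rebuilt)
      (u, (diffs.countP (fun d => d == 0) : Int), diffs.sum))) =
      us.map (scoreR rows' w) := by
    apply List.map_congr_left
    intro u _
    simp only [scoreR, rebuiltR, rebuilt_alt_eq u w]
  rw [hscored]
  obtain ⟨u0, us', hus'⟩ : ∃ u0 us', us = u0 :: us' := by
    cases us with
    | nil => exact absurd rfl husne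
    | cons a l => exact ⟨a, l, rfl⟩
  rw [hus']
  simp only [List.map_cons, List.foldl_cons]
  set x := scoreR rows' w u0 with hx
  set t := us'.map (scoreR rows' w) with ht
  have hx1 : 0 ≤ x.2.1 := by
    rw [hx]
    simp only [scoreR]
    positivity
  obtain ⟨r, hr1, hr2⟩ := sel_diag t x
  have hfirst : selUpd ((none, -1, 10 ^ 9) : Option (List Int) × Int × Int) x =
      (some x.1, x.2.1, x.2.2) := by
    unfold selUpd
    have h1 : (x.2.1 > (-1 : Int)) = true := by simp; omega
    rw [if_pos (by simp [h1])]
  rw [hfirst, hr2, hr1]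

theorem best_consensus_unit_eq (rows : List (List Int)) :
    best_consensus_unit rows = best_consensus_unit_alt rows := by
  match rows with
  | [] => rfl
  | r0 :: rs =>
    simp only [best_consensus_unit, best_consensus_unit_alt]
    rw [candidates_eq (r0 :: rs) []]
    simp only [List.nil_append]
    set cs := ((r0 :: rs).filter (fun r => r != [])).map minimal_unit with hcs
    by_cases hcs0 : cs = []
    · rw [hcs0]
      simp [PySem.List.dedup, PySem.Set.ofList]
    · rw [if_neg hcs0, if_neg (by
        have := dedup_ne_nil cs hcs0
        simpa using this)]
      rw [seen_unique_eq cs []]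
      have hus : cs.foldl PySem.Set.add [] = PySem.List.dedup cs := by
        rw [PySem.List.dedup_eq_ofList, PySem.Set.ofList_eq_foldl]
      rw [hus]
      exact sel_stage (r0 :: rs) r0.length (PySem.List.dedup cs) (dedup_ne_nil cs hcs0)

-- ===== VERDICT (by name: the statement is the Claim_ definition above) =====
theorem best_consensus_unit_spec : Claim_equal_best_consensus_unit := by
  intro rows _
  unfold Spec_best_consensus_unit
  exact best_consensus_unit_eq rows
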